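-- pv_equiv track=rewrite | github.com/bubpen/codekata | 프로그래머스/1/12930. 이상한 문자 만들기/이상한 문자 만들기.py | solution
-- ===== SOURCE A (Python) =====
-- def solution(s):
--     answer = []
--     w = ''
--     for i in s.split(' '):
--         for j in range(len(i)):
--             if j % 2 == 0:
--                 w = w + i[j].upper()
--             else:
--                 w = w + i[j].lower()
--         answer.append(w)
--         w = ''
--     return ' '.join(answer)
-- ===== SOURCE B (Python) =====
-- def solution(s):
--     out = []
--     k = 0
--     for ch in s:
--         if ch == ' ':
--             out.append(ch)
--             k = 0
--         else:
--             out.append(ch.upper() if k % 2 == 0 else ch.lower())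
--             k += 1
--     return ''.join(out)
-- ===== Notes on version B (the rewrite author's own statement) =====
-- stated objective: simpler
-- what changed: Replaced split/per-word indexing/join with a single left-to-right pass keeping a word-relative position counter that restarts at each word boundary.
import Mathlib
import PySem

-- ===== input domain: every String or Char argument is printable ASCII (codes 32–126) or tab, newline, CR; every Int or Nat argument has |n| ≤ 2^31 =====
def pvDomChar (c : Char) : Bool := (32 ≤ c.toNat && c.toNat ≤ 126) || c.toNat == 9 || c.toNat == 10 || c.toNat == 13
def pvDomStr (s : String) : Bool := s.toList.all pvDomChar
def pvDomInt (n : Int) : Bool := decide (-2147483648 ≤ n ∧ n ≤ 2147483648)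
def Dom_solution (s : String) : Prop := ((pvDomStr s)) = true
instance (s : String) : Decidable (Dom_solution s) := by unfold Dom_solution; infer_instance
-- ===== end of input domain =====

-- B replaces A's split/per-word indexed loop/join with a single pass over the string
-- keeping a word-relative counter that restarts at each word boundary (objective: simpler).

-- ===== PORT A =====
def solution (s : String) : String :=
  String.ofList (PySem.Chars.join [' ']
    ((PySem.Chars.splitOn s.toList [' ']).foldl (fun answer i =>
      answer ++ [(PySem.List.pyRange 0 (i.length : Int) 1).foldl (fun w j =>
        if PySem.Int.mod j 2 = 0 then
          w ++ [PySem.Chars.upperChar (PySem.List.pyGetD i j ' ')]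
        else
          w ++ [PySem.Chars.lowerChar (PySem.List.pyGetD i j ' ')]) []]) []))

-- ===== PORT B =====
def solution_alt (s : String) : String :=
  String.ofList (s.toList.foldl (fun (st : List Char × Nat) c =>
    if c = ' ' then (st.1 ++ [c], 0)
    else (st.1 ++ [if st.2 % 2 = 0 then PySem.Chars.upperChar c else PySem.Chars.lowerChar c],
          st.2 + 1)) ([], 0)).1

-- ===== PRECONDITION & SPEC =====
def Spec_solution (s : String) (out : String) : Prop := out = solution_alt s
instance (s : String) (out : String) : Decidable (Spec_solution s out) := by unfold Spec_solution; infer_instance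

-- ===== CLAIM (what is proved, stated in full; the proofs are below) =====
def Claim_equal_solution : Prop := ∀ (s : String), Dom_solution s → Spec_solution s (solution s)

-- ===== LEMMAS AND PROOFS =====

-- one word processed with alternating case, counter starting at k
def gW : List Char → Nat → List Char
  | [], _ => []
  | c :: r, k =>
      (if k % 2 = 0 then PySem.Chars.upperChar c else PySem.Chars.lowerChar c) :: gW r (k + 1)

-- the whole string processed in one pass, counter starting at k, resetting on spaces
def fAll : List Char → Nat → List Char
  | [], _ => []
  | c :: r, k =>
      if c = ' ' then ' ' :: fAll r 0
      else (if k % 2 = 0 then PySem.Chars.upperChar c else PySem.Chars.lowerChar c) :: fAll r (k + 1)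

-- structural split on a single space
def sp1 : List Char → List (List Char)
  | [] => [[]]
  | c :: r => if c = ' ' then [] :: sp1 r else (c :: (sp1 r).headI) :: (sp1 r).tail

lemma sp1_ne_nil (cs : List Char) : sp1 cs ≠ [] := by
  cases cs with
  | nil => simp [sp1]
  | cons c r => by_cases h : c = ' ' <;> simp [sp1, h]

lemma sp1_cons_headI_tail (cs : List Char) : (sp1 cs).headI :: (sp1 cs).tail = sp1 cs := by
  cases h : sp1 cs with
  | nil => exact absurd h (sp1_ne_nil cs)
  | cons a t => simp

-- A's splitOn.go characterised by sp1
lemma go_eq (fuel : Nat) (l cur : List Char) (acc : List (List Char)) (h : l.length < fuel) :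
    PySem.Chars.splitOn.go [' '] fuel l cur acc
      = acc.reverse ++ ((cur.reverse ++ (sp1 l).headI) :: (sp1 l).tail) := by
  induction fuel generalizing l cur acc with
  | zero => omega
  | succ n ih =>
    cases l with
    | nil => simp [PySem.Chars.splitOn.go, sp1]
    | cons c r =>
      by_cases hc : c = ' '
      · subst hc
        rw [show PySem.Chars.splitOn.go [' '] (n+1) (' ' :: r) cur acc
              = PySem.Chars.splitOn.go [' '] n r [] (cur.reverse :: acc) by
            simp [PySem.Chars.splitOn.go, List.isPrefixOf]]
        rw [ih r [] (cur.reverse :: acc) (by simpa using Nat.lt_of_succ_lt_succ h)]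
        simp [sp1, sp1_cons_headI_tail r]
      · rw [show PySem.Chars.splitOn.go [' '] (n+1) (c :: r) cur acc
              = PySem.Chars.splitOn.go [' '] n r (c :: cur) acc by
            simp [PySem.Chars.splitOn.go, List.isPrefixOf, (Ne.symm hc : ' ' ≠ c)]]
        rw [ih r (c :: cur) acc (by simpa using Nat.lt_of_succ_lt_succ h)]
        simp [sp1, hc]

lemma splitOn_eq_sp1 (cs : List Char) : PySem.Chars.splitOn cs [' '] = sp1 cs := by
  rw [PySem.Chars.splitOn, go_eq cs.length.succ cs [] [] (Nat.lt_succ_self _)]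
  simpa using sp1_cons_headI_tail cs

-- A's inner loop over range(len i) computes gW
set_option maxRecDepth 4096 in
lemma innerL (full : List Char) (a : Nat) (w : List Char) :
    (PySem.List.pyRange (a : Int) (full.length : Int) 1).foldl (fun w j =>
      if PySem.Int.mod j 2 = 0 then
        w ++ [PySem.Chars.upperChar (PySem.List.pyGetD full j ' ')]
      else
        w ++ [PySem.Chars.lowerChar (PySem.List.pyGetD full j ' ')]) w
      = w ++ gW (full.drop a) a := by
  by_cases hlt : a < full.length
  · rw [PySem.List.pyRange_one_cons (by exact_mod_cast hlt)]
    have hdrop : full.drop a = full[a] :: full.drop (a + 1) :=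
      (List.getElem_cons_drop hlt).symm
    have hget : PySem.List.pyGetD full (a : Int) ' ' = full[a] :=
      PySem.List.pyGetD_ofNat full a ' ' hlt
    have hmod : PySem.Int.mod (a : Int) 2 = ((a % 2 : Nat) : Int) :=
      PySem.Int.mod_natCast a 2
    have hcast : ((a : Int) + 1) = ((a + 1 : Nat) : Int) := by push_cast; ring
    simp only [List.foldl_cons, hget, hmod, hcast]
    rw [innerL full (a + 1)]
    rw [hdrop]
    rw [show gW (full[a] :: full.drop (a + 1)) a
          = (if a % 2 = 0 then PySem.Chars.upperChar full[a] else PySem.Chars.lowerChar full[a])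
            :: gW (full.drop (a + 1)) (a + 1) from rfl]
    by_cases hp : a % 2 = 0
    · rw [if_pos (by exact_mod_cast congrArg (Nat.cast : Nat → Int) hp), if_pos hp]
      simp
    · rw [if_neg (by exact_mod_cast fun h => hp (by exact_mod_cast h)), if_neg hp]
      simp
  · rw [PySem.List.pyRange_one_eq_nil (by exact_mod_cast Nat.le_of_not_lt hlt)]
    rw [List.drop_eq_nil_of_le (Nat.le_of_not_lt hlt)]
    simp [gW]
termination_by full.length - a

-- joining the alternated words equals the one-pass result
lemma joinL (cs : List Char) (k : Nat) :
    PySem.Chars.join [' '] (gW (sp1 cs).headI k :: ((sp1 cs).tail).map (fun i => gW i 0))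
      = fAll cs k := by
  induction cs generalizing k with
  | nil => simp [sp1, gW, fAll, PySem.Chars.join, List.intercalate]
  | cons c r ih =>
    by_cases hc : c = ' '
    · subst hc
      have hs : sp1 (' ' :: r) = [] :: sp1 r := by simp [sp1]
      rw [hs]
      simp only [List.headI, List.tail_cons]
      rw [show gW ([] : List Char) k = [] from rfl]
      conv_lhs => rw [← sp1_cons_headI_tail r, List.map_cons]
      rw [PySem.Chars.join_cons_cons, ih 0]
      simp [fAll]
    · have hs : sp1 (c :: r) = (c :: (sp1 r).headI) :: (sp1 r).tail := by simp [sp1, hc]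
      rw [hs]
      simp only [List.headI_cons, List.tail_cons]
      rw [show gW (c :: (sp1 r).headI) k
            = (if k % 2 = 0 then PySem.Chars.upperChar c else PySem.Chars.lowerChar c)
              :: gW (sp1 r).headI (k + 1) from rfl]
      rw [show ∀ (x : Char) (p : List Char) (rest : List (List Char)),
            PySem.Chars.join [' '] ((x :: p) :: rest) = x :: PySem.Chars.join [' '] (p :: rest)
          from fun x p rest => by
            cases rest <;> simp [PySem.Chars.join, List.intercalate]]
      rw [ih (k + 1)]
      simp [fAll, hc]

-- B's fold computes fAll
lemma foldB (cs : List Char) (acc : List Char) (k : Nat) :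
    (cs.foldl (fun (st : List Char × Nat) c =>
      if c = ' ' then (st.1 ++ [c], 0)
      else (st.1 ++ [if st.2 % 2 = 0 then PySem.Chars.upperChar c else PySem.Chars.lowerChar c],
            st.2 + 1)) (acc, k)).1 = acc ++ fAll cs k := by
  induction cs generalizing acc k with
  | nil => simp [fAll]
  | cons c r ih =>
    by_cases hc : c = ' '
    · subst hc; simp only [List.foldl_cons, if_pos]; rw [ih]; simp [fAll]
    · simp only [List.foldl_cons, if_neg hc]; rw [ih]; simp [fAll, hc]

-- ===== VERDICT (by name: the statement is the Claim_ definition above) =====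
theorem solution_spec : Claim_equal_solution := by
  intro s _
  show solution s = solution_alt s
  unfold solution solution_alt
  rw [splitOn_eq_sp1, foldB]
  congr 1
  have hmap : ∀ (parts : List (List Char)),
      parts.foldl (fun answer i =>
        answer ++ [(PySem.List.pyRange 0 (i.length : Int) 1).foldl (fun w j =>
          if PySem.Int.mod j 2 = 0 then
            w ++ [PySem.Chars.upperChar (PySem.List.pyGetD i j ' ')]
          else
            w ++ [PySem.Chars.lowerChar (PySem.List.pyGetD i j ' ')]) []]) []
        = parts.map (fun i => gW i 0) := by
    intro parts
    rw [PySem.List.foldl_append_singleton_eq_map]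
    refine List.map_congr_left (fun i _ => ?_)
    have := innerL i 0 []
    simpa using this
  rw [hmap]
  conv_lhs => rw [← sp1_cons_headI_tail s.toList]
  simp only [List.map_cons]
  exact joinL s.toList 0
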